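-- pv_equiv track=rewrite | github.com/rgeissen/uderia | components/builtin/scheduler/handler.py | validate_arguments
-- ===== SOURCE A (Python) =====
-- from typing import Any, Dict, List, Optional, Tuple
--
-- def validate_arguments(arguments: Dict[str, Any]) -> Tuple[bool, str]:
--     action = arguments.get("action", "")
--     valid_actions = {"create", "list", "update", "delete", "enable", "disable", "run_now", "history"}
--     if action not in valid_actions:
--         return False, f"Unknown action '{action}'. Must be one of: {', '.join(sorted(valid_actions))}."
--     if action == "create":
--         for field in ("name", "prompt", "schedule"):
--             if not arguments.get(field):
--                 return False, f"'{field}' is required for action 'create'."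
--     if action in {"update", "delete", "enable", "disable", "run_now", "history"}:
--         if not arguments.get("task_id"):
--             return False, f"'task_id' is required for action '{action}'."
--     return True, ""
-- ===== SOURCE B (Python) =====
-- _SPEC = {
--     "create": ("name", "prompt", "schedule"),
--     "list": (),
--     "update": ("task_id",),
--     "delete": ("task_id",),
--     "enable": ("task_id",),
--     "disable": ("task_id",),
--     "run_now": ("task_id",),
--     "history": ("task_id",),
-- }
--
--
-- def validate_arguments(arguments):
--     # One pass over the dict collects the keys with truthy values; validation is
--     # then pure set membership driven by the declarative requirements table.
--     present = {k for k, v in arguments.items() if v}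
--     action = arguments.get("action", "")
--     required = _SPEC.get(action)
--     if required is None:
--         return False, f"Unknown action '{action}'. Must be one of: {', '.join(sorted(_SPEC))}."
--     missing = next((f for f in required if f not in present), None)
--     if missing is None:
--         return True, ""
--     return False, f"'{missing}' is required for action '{action}'."
-- ===== Notes on version B (the rewrite author's own statement) =====
-- stated objective: alternative
-- what changed: Instead of A's per-action branch chain with a dict.get per required field, B makes one pass over the dict collecting the set of keys with truthy values and then finds the first required field missing from that set, driven by a declarative action->required-fields table that also supplies the unknown-action message; Pre_ excludes association lists with duplicate keys, which do not represent a Python dict (first-match vs present-set reading there is an artefact of the encoding, inverted Python cannot produce it).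
import Mathlib
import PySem

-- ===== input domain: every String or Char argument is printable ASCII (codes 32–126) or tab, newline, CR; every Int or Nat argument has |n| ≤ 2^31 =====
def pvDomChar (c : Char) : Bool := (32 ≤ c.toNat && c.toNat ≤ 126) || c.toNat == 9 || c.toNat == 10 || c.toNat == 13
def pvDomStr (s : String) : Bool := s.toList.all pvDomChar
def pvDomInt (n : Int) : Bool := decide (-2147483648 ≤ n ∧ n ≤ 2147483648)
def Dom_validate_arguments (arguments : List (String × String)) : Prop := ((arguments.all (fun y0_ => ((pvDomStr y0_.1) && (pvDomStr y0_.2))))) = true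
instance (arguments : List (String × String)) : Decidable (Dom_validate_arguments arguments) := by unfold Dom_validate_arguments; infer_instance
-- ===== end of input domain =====

-- B replaces A's per-action branch chain (a dict.get per required field) by one pass
-- collecting the set of truthy keys, then a first-missing-field search over a
-- declarative action -> required-fields table (objective: alternative decomposition).

-- ===== PORT A =====
-- Python truthiness of arguments.get(field): with string values, falsy ⟺ missing or "";
-- modelled exactly by PySem.Dict.getD … field "" == "".
def validate_arguments (arguments : List (String × String)) : Bool × String :=
  let action := PySem.Dict.getD (PySem.Dict.mk arguments) "action" ""
  let valid_actions : PySem.Set String :=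
    PySem.Set.ofList ["create", "list", "update", "delete", "enable", "disable", "run_now", "history"]
  if ¬ (PySem.Set.contains valid_actions action) then
    (false, "Unknown action '" ++ action ++ "'. Must be one of: " ++
      PySem.Str.join ", " (PySem.List.sorted valid_actions (fun x => x) false) ++ ".")
  else
    -- if action == "create": for field in (...): if not get(field): return …
    let createCheck : Option (Bool × String) :=
      if action == "create" then
        ["name", "prompt", "schedule"].foldl (fun acc field =>
          match acc with
          | some r => some r
          | none =>
            if PySem.Dict.getD (PySem.Dict.mk arguments) field "" == "" then
              some (false, "'" ++ field ++ "' is required for action 'create'.")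
            else none) none
      else none
    match createCheck with
    | some r => r
    | none =>
      if PySem.Set.contains
            (PySem.Set.ofList ["update", "delete", "enable", "disable", "run_now", "history"]) action
          && (PySem.Dict.getD (PySem.Dict.mk arguments) "task_id" "" == "") then
        (false, "'task_id' is required for action '" ++ action ++ "'.")
      else
        (true, "")

-- ===== PORT B =====
def SPEC_TABLE : List (String × List String) :=
  [("create", ["name", "prompt", "schedule"]),
   ("list", []),
   ("update", ["task_id"]),
   ("delete", ["task_id"]),
   ("enable", ["task_id"]),
   ("disable", ["task_id"]),
   ("run_now", ["task_id"]),
   ("history", ["task_id"])]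

-- next((f for f in required if f not in present), None)
def firstMissing (present : PySem.Set String) : List String → Option String
  | [] => none
  | f :: rest =>
    if PySem.Set.contains present f then firstMissing present rest else some f

def validate_arguments_alt (arguments : List (String × String)) : Bool × String :=
  -- {k for k, v in arguments.items() if v}: the dict's items ARE the assoc list (keys unique under Pre_)
  let present : PySem.Set String :=
    PySem.Set.ofList ((arguments.filter (fun p => !(p.2 == ""))).map Prod.fst)
  let action := PySem.Dict.getD (PySem.Dict.mk arguments) "action" ""
  match PySem.Dict.get? (PySem.Dict.mk SPEC_TABLE) action with
  | none =>
    (false, "Unknown action '" ++ action ++ "'. Must be one of: " ++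
      PySem.Str.join ", "
        (PySem.List.sorted (PySem.Dict.keys (PySem.Dict.mk SPEC_TABLE)) (fun x => x) false) ++ ".")
  | some required =>
    match firstMissing present required with
    | none => (true, "")
    | some f => (false, "'" ++ f ++ "' is required for action '" ++ action ++ "'.")

-- ===== PRECONDITION & SPEC =====
-- Pre_ excludes association lists with duplicate keys: they do not represent a Python
-- dict (the parameter's type), and which entry counts there is an artefact of the encoding.
def Pre_validate_arguments (arguments : List (String × String)) : Prop :=
  (arguments.map Prod.fst).Nodup
instance (arguments : List (String × String)) : Decidable (Pre_validate_arguments arguments) := by unfold Pre_validate_arguments; infer_instance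

def pvWitness_validate_arguments : (List (String × String)) :=
  [("action", "update"), ("task_id", "t1")]

def Spec_validate_arguments (arguments : List (String × String)) (out : Bool × String) : Prop := out = validate_arguments_alt arguments
instance (arguments : List (String × String)) (out : Bool × String) : Decidable (Spec_validate_arguments arguments out) := by unfold Spec_validate_arguments; infer_instance

-- ===== CLAIM (what is proved, stated in full; the proofs are below) =====
def Claim_equal_validate_arguments : Prop := ∀ (arguments : List (String × String)), Dom_validate_arguments arguments → Pre_validate_arguments arguments → Spec_validate_arguments arguments (validate_arguments arguments)

-- ===== LEMMAS AND PROOFS =====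

-- On nodup-key lists, membership in B's truthy-key list is exactly "getD ≠ ''".
theorem mem_truthy (args : List (String × String))
    (h : (args.map Prod.fst).Nodup) (f : String) :
    f ∈ (args.filter (fun p => !(p.2 == ""))).map Prod.fst
      ↔ PySem.Dict.getD (PySem.Dict.mk args) f "" ≠ "" := by
  induction args with
  | nil => simp [PySem.Dict.getD, PySem.Dict.get?]
  | cons p rest ih =>
    obtain ⟨k, v⟩ := p
    simp only [List.map_cons, List.nodup_cons] at h
    obtain ⟨hnotin, hnodup⟩ := h
    rw [show PySem.Dict.getD (PySem.Dict.mk ((k, v) :: rest)) f "" =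
          (PySem.Dict.get? (PySem.Dict.mk ((k, v) :: rest)) f).getD "" from
        PySem.Dict.getD_eq_get?_getD _ _ _,
      PySem.Dict.get?_mk_cons]
    by_cases hk : k = f
    · subst hk
      have hkrest : k ∉ (rest.filter (fun q => !(q.2 == ""))).map Prod.fst := by
        intro hmem
        rcases List.mem_map.mp hmem with ⟨q, hq, hq1⟩
        exact hnotin (List.mem_map.mpr ⟨q, List.mem_of_mem_filter hq, hq1⟩)
      by_cases hv : v = "" <;> simp [hv, hkrest]
    · have hbeq : (k == f) = false := by simp [hk]
      have ihr := ih hnodup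
      rw [PySem.Dict.getD_eq_get?_getD] at ihr
      by_cases hv : v = "" <;>
        simp [hv, hbeq, Ne.symm hk, ihr]

theorem present_contains (args : List (String × String))
    (h : (args.map Prod.fst).Nodup) (f : String) :
    PySem.Set.contains
        (PySem.Set.ofList ((args.filter (fun p => !(p.2 == ""))).map Prod.fst)) f
      = !(PySem.Dict.getD (PySem.Dict.mk args) f "" == "") := by
  have hmem := mem_truthy args h f
  by_cases hg : PySem.Dict.getD (PySem.Dict.mk args) f "" = ""
  · have hfn : f ∉ (args.filter (fun p => !(p.2 == ""))).map Prod.fst :=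
      fun hf => (hmem.mp hf) hg
    simp [PySem.Set.contains_eq_listContains, PySem.Set.mem_ofList, hfn, hg]
  · have hfy := hmem.mpr hg
    simp [PySem.Set.contains_eq_listContains, PySem.Set.mem_ofList, hfy, hg]

-- A's two literal action sets reduce to plain (duplicate-free) lists.
theorem hset1 :
    PySem.Set.ofList ["create", "list", "update", "delete", "enable", "disable", "run_now", "history"]
      = ["create", "list", "update", "delete", "enable", "disable", "run_now", "history"] := by decide

theorem hset2 :
    PySem.Set.ofList ["update", "delete", "enable", "disable", "run_now", "history"]
      = ["update", "delete", "enable", "disable", "run_now", "history"] := by decide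

theorem ports_agree (arguments : List (String × String))
    (h : (arguments.map Prod.fst).Nodup) :
    validate_arguments arguments = validate_arguments_alt arguments := by
  have pcS := present_contains arguments h
  unfold validate_arguments validate_arguments_alt
  by_cases h1 : PySem.Dict.getD (PySem.Dict.mk arguments) "action" "" = "create"
  · have hg : PySem.Dict.get? (PySem.Dict.mk SPEC_TABLE) "create"
        = some ["name", "prompt", "schedule"] := by decide
    simp only [h1, hg, firstMissing, pcS "name", pcS "prompt", pcS "schedule", hset1, hset2]
    by_cases hn : PySem.Dict.getD (PySem.Dict.mk arguments) "name" "" = "" <;>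
      by_cases hp : PySem.Dict.getD (PySem.Dict.mk arguments) "prompt" "" = "" <;>
        by_cases hs : PySem.Dict.getD (PySem.Dict.mk arguments) "schedule" "" = "" <;>
          simp [hn, hp, hs, PySem.Set.contains]
  · by_cases h2 : PySem.Dict.getD (PySem.Dict.mk arguments) "action" "" = "list"
    · have hg : PySem.Dict.get? (PySem.Dict.mk SPEC_TABLE) "list" = some [] := by decide
      simp [h2, hg, firstMissing, hset1, hset2, PySem.Set.contains]
    · by_cases h3 : PySem.Dict.getD (PySem.Dict.mk arguments) "action" "" = "update"
      · have hg : PySem.Dict.get? (PySem.Dict.mk SPEC_TABLE) "update" = some ["task_id"] := by decide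
        simp only [h3, hg, firstMissing, pcS "task_id", hset1, hset2]
        by_cases ht : PySem.Dict.getD (PySem.Dict.mk arguments) "task_id" "" = "" <;>
          simp [ht, PySem.Set.contains]
      · by_cases h4 : PySem.Dict.getD (PySem.Dict.mk arguments) "action" "" = "delete"
        · have hg : PySem.Dict.get? (PySem.Dict.mk SPEC_TABLE) "delete" = some ["task_id"] := by decide
          simp only [h4, hg, firstMissing, pcS "task_id", hset1, hset2]
          by_cases ht : PySem.Dict.getD (PySem.Dict.mk arguments) "task_id" "" = "" <;>
            simp [ht, PySem.Set.contains]
        · by_cases h5 : PySem.Dict.getD (PySem.Dict.mk arguments) "action" "" = "enable"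
          · have hg : PySem.Dict.get? (PySem.Dict.mk SPEC_TABLE) "enable" = some ["task_id"] := by decide
            simp only [h5, hg, firstMissing, pcS "task_id", hset1, hset2]
            by_cases ht : PySem.Dict.getD (PySem.Dict.mk arguments) "task_id" "" = "" <;>
              simp [ht, PySem.Set.contains]
          · by_cases h6 : PySem.Dict.getD (PySem.Dict.mk arguments) "action" "" = "disable"
            · have hg : PySem.Dict.get? (PySem.Dict.mk SPEC_TABLE) "disable" = some ["task_id"] := by decide
              simp only [h6, hg, firstMissing, pcS "task_id", hset1, hset2]
              by_cases ht : PySem.Dict.getD (PySem.Dict.mk arguments) "task_id" "" = "" <;>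
                simp [ht, PySem.Set.contains]
            · by_cases h7 : PySem.Dict.getD (PySem.Dict.mk arguments) "action" "" = "run_now"
              · have hg : PySem.Dict.get? (PySem.Dict.mk SPEC_TABLE) "run_now" = some ["task_id"] := by decide
                simp only [h7, hg, firstMissing, pcS "task_id", hset1, hset2]
                by_cases ht : PySem.Dict.getD (PySem.Dict.mk arguments) "task_id" "" = "" <;>
                  simp [ht, PySem.Set.contains]
              · by_cases h8 : PySem.Dict.getD (PySem.Dict.mk arguments) "action" "" = "history"
                · have hg : PySem.Dict.get? (PySem.Dict.mk SPEC_TABLE) "history" = some ["task_id"] := by decide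
                  simp only [h8, hg, firstMissing, pcS "task_id", hset1, hset2]
                  by_cases ht : PySem.Dict.getD (PySem.Dict.mk arguments) "task_id" "" = "" <;>
                    simp [ht, PySem.Set.contains]
                · -- unknown action: both take the error branch; align the message tails
                  have hf : List.find?
                      (fun p => p.1 == PySem.Dict.getD (PySem.Dict.mk arguments) "action" "")
                      SPEC_TABLE = none := by
                    rw [List.find?_eq_none]
                    intro p hp
                    simp only [SPEC_TABLE, List.mem_cons, List.not_mem_nil, or_false] at hp
                    rcases hp with rfl | rfl | rfl | rfl | rfl | rfl | rfl | rfl <;>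
                      simp only [beq_iff_eq] <;> intro hq <;>
                        first
                          | exact h1 hq.symm
                          | exact h2 hq.symm
                          | exact h3 hq.symm
                          | exact h4 hq.symm
                          | exact h5 hq.symm
                          | exact h6 hq.symm
                          | exact h7 hq.symm
                          | exact h8 hq.symm
                  simp only [SPEC_TABLE] at hf
                  simp [hset1, PySem.Set.contains, PySem.Dict.get?, SPEC_TABLE,
                    h1, h2, h3, h4, h5, h6, h7, h8, hf]

-- ===== VERDICT (by name: the statement is the Claim_ definition above) =====
theorem validate_arguments_spec : Claim_equal_validate_arguments := by
  intro arguments _ hpre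
  exact ports_agree arguments hpre
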